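-- pv_equiv track=rewrite | github.com/Ankan1998/Faster-RCNN | utils/bbox_area_checker.py | bbox_area_checker
-- ===== SOURCE A (Python) =====
-- def bbox_area_checker(bboxes):
--     flag=0
--     bbxidx = -9999
--     for idx, bbox in enumerate(bboxes):
--         area = (bbox[2]-bbox[0])*(bbox[3]-bbox[1])
--         if area<0 or area ==0:
--             flag = 1
--             bbxidx = idx
--     return flag,bbxidx
-- ===== SOURCE B (Python) =====
-- def bbox_area_checker(bboxes):
--     for idx in range(len(bboxes) - 1, -1, -1):
--         b = bboxes[idx]
--         if (b[2] - b[0]) * (b[3] - b[1]) <= 0: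
--             return 1, idx
--     return 0, -9999
-- ===== Notes on version B (the rewrite author's own statement) =====
-- stated objective: simpler
-- what changed: Replaces the full forward scan that keeps overwriting flag/bbxidx with a backward scan that returns (1, idx) at the first (i.e. last) non-positive-area bbox and (0, -9999) if none, using a single <= 0 test instead of 'area<0 or area==0'.
import Mathlib
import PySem

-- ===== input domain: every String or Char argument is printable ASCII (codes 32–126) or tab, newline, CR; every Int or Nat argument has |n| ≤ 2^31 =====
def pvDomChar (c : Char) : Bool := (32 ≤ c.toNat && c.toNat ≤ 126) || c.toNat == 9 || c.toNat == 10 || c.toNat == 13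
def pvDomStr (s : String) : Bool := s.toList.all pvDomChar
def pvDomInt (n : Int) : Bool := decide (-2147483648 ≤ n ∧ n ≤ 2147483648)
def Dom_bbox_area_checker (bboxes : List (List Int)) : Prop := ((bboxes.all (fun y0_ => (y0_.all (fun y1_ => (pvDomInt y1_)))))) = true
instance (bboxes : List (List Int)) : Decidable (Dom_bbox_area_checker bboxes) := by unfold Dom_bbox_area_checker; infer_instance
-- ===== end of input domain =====

-- B replaces A's forward scan-and-overwrite with a backward early-terminating search (simpler decomposition, same O(n)).

-- ===== PORT A =====
def bbox_area_checker (bboxes : List (List Int)) : Int × Int :=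
  let st :=
    (PySem.List.enumerate bboxes 0).foldl
      (fun (st : Int × Int) (p : Int × List Int) =>
        let area := ((PySem.List.pyGet? p.2 2).getD 0 - (PySem.List.pyGet? p.2 0).getD 0) *
                    ((PySem.List.pyGet? p.2 3).getD 0 - (PySem.List.pyGet? p.2 1).getD 0)
        if area < 0 ∨ area = 0 then (1, p.1) else st)
      (0, -9999)
  st

-- ===== PORT B =====
-- backward scan: first hit from the end wins
def bboxAltGo : List (List Int) → Int → Int × Int
  | [], _ => (0, -9999)
  | b :: rest, idx =>
    if ((PySem.List.pyGet? b 2).getD 0 - (PySem.List.pyGet? b 0).getD 0) *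
       ((PySem.List.pyGet? b 3).getD 0 - (PySem.List.pyGet? b 1).getD 0) ≤ 0 then (1, idx)
    else bboxAltGo rest (idx - 1)

def bbox_area_checker_alt (bboxes : List (List Int)) : Int × Int :=
  bboxAltGo bboxes.reverse ((bboxes.length : Int) - 1)

-- ===== PRECONDITION & SPEC =====
-- Pre_ excludes exactly the inputs on which the Python A raises IndexError: a bbox with fewer than 4 entries.
def Pre_bbox_area_checker (bboxes : List (List Int)) : Prop :=
  ∀ b ∈ bboxes, 4 ≤ b.length
instance (bboxes : List (List Int)) : Decidable (Pre_bbox_area_checker bboxes) := by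
  unfold Pre_bbox_area_checker; infer_instance
def pvWitness_bbox_area_checker : List (List Int) := [[0, 0, 1, 1], [2, 2, 2, 5]]

def Spec_bbox_area_checker (bboxes : List (List Int)) (out : Int × Int) : Prop :=
  out = bbox_area_checker_alt bboxes
instance (bboxes : List (List Int)) (out : Int × Int) : Decidable (Spec_bbox_area_checker bboxes out) := by
  unfold Spec_bbox_area_checker; infer_instance

-- ===== CLAIM (what is proved, stated in full; the proofs are below) =====
def Claim_equal_bbox_area_checker : Prop := ∀ (bboxes : List (List Int)), Dom_bbox_area_checker bboxes → Pre_bbox_area_checker bboxes → Spec_bbox_area_checker bboxes (bbox_area_checker bboxes)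

-- ===== LEMMAS AND PROOFS =====

theorem bbox_eq_alt (bboxes : List (List Int)) :
    bbox_area_checker bboxes = bboxAltGo bboxes.reverse ((bboxes.length : Int) - 1) := by
  induction bboxes using List.reverseRecOn with
  | nil => simp [bbox_area_checker, bboxAltGo]
  | append_singleton l b ih =>
    simp only [bbox_area_checker, PySem.List.enumerate_append, List.foldl_append,
      PySem.List.enumerate_cons, PySem.List.enumerate_nil, List.foldl_cons, List.foldl_nil,
      List.reverse_append, List.reverse_cons, List.reverse_nil, List.nil_append,
      List.cons_append, List.length_append, List.length_cons, List.length_nil] at *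
    set area := ((PySem.List.pyGet? b 2).getD 0 - (PySem.List.pyGet? b 0).getD 0) *
                ((PySem.List.pyGet? b 3).getD 0 - (PySem.List.pyGet? b 1).getD 0) with harea
    by_cases h : area ≤ 0
    · have h' : area < 0 ∨ area = 0 := by omega
      simp [bboxAltGo, ← harea, h, h', Nat.cast_add]
    · have h' : ¬ (area < 0 ∨ area = 0) := by omega
      simp only [bboxAltGo, ← harea, if_neg h, if_neg h']
      rw [ih]
      congr 1
      push_cast
      ring

-- ===== VERDICT (by name: the statement is the Claim_ definition above) =====
theorem bbox_area_checker_spec : Claim_equal_bbox_area_checker := by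
  intro bboxes _ _
  unfold Spec_bbox_area_checker bbox_area_checker_alt
  exact bbox_eq_alt bboxes
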